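-- pv_equiv track=rewrite | github.com/APodolskiy/programming_problems | stepik_course/gold_fair_cur.py | fair_cut_brute
-- ===== SOURCE A (Python) =====
-- from typing import List
--
-- def fair_cut_brute(arr: List[int]) -> int:
--     n = len(arr)
--     assert n <= 30
--     best_cut = sum(arr) + 1
--     for mask in range(2**n - 1):
--         cur_sum = 0
--         for i in range(n):
--             if mask & (1 << i):
--                 cur_sum += arr[i]
--             else:
--                 cur_sum -= arr[i]
--         if abs(cur_sum) < best_cut:
--             best_cut = abs(cur_sum)
--     return best_cut
-- ===== SOURCE B (Python) =====
-- from typing import List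
--
-- def fair_cut_brute(arr: List[int]) -> int:
--     n = len(arr)
--     assert n <= 30
--     # one doubling pass: after processing a prefix, sums holds every signed
--     # sum of that prefix; no mask enumeration, no inner bit-test loop
--     sums = [0]
--     for x in arr:
--         sums = [s + x for s in sums] + [s - x for s in sums]
--     return min(abs(s) for s in sums)
-- ===== Notes on version B (the rewrite author's own statement) =====
-- stated objective: faster
-- what changed: B builds the list of all 2^n signed sums by one doubling pass over arr (each element extends the partial-sum list with +x and -x) and returns the minimum absolute value, instead of enumerating 2^n bit-masks each with an inner O(n) bit-test loop against a sum(arr)+1 sentinel.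
-- intended difference: On lists with negative total (and the empty list) A's initial bound sum(arr)+1 is never beaten, so A returns it -- a negative number when sum < -1, 0 when sum = -1, 1 on the empty list -- while B returns the true minimal absolute signed sum, which is the intended value of a fair-cut difference. — e.g. on fair_cut_brute([-5]): A returns -4, B returns 5
import Mathlib
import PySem

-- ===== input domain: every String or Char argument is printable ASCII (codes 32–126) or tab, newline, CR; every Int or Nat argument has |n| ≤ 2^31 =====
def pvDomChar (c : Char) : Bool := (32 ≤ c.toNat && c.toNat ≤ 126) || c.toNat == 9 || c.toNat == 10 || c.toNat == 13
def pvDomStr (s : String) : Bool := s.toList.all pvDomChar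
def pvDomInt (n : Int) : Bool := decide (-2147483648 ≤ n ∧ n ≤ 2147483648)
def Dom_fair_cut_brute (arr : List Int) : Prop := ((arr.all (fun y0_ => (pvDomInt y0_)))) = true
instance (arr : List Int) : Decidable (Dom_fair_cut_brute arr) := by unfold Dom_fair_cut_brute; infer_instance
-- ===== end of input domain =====

-- B replaces A's 2^n-mask enumeration (inner O(n) bit loop) by one doubling pass building all
-- signed sums and returns their minimal absolute value; A and B differ exactly on D_ below
-- (negative total or empty list), where A returns its unbeaten initial bound sum(arr)+1.


-- ===== PORT A =====
-- literal port of A: best = sum(arr)+1; for mask in range(2**n - 1): inner loop over i in range(n)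
-- testing mask & (1 << i) (mask and i are nonnegative, so .toNat on the shift amount and the
-- Nat-exponent 2^n are exact); arr[i] with 0 ≤ i < n is in range, so pyGetD is exact.
def fair_cut_brute (arr : List Int) : Int :=
  let n : Nat := arr.length
  -- assert n <= 30  → Pre_fair_cut_brute
  let best : Int := arr.sum + 1
  (PySem.List.pyRange 0 ((2 : Int) ^ n - 1) 1).foldl
    (fun best mask =>
      let cur : Int :=
        (PySem.List.pyRange 0 (n : Int) 1).foldl
          (fun cur i =>
            if PySem.Int.band mask ((1 : Int) <<< i.toNat) ≠ 0 then
              cur + PySem.List.pyGetD arr i 0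
            else
              cur - PySem.List.pyGetD arr i 0) 0
      if |cur| < best then |cur| else best) best

-- ===== PORT B =====
-- literal port of Source B: sums = [0]; for x in arr: sums = [s+x for s in sums] + [s-x for s in sums];
-- return min(abs(s) for s in sums).  sums is never empty, so Python's min of the generator always
-- exists; the none branch of min? is unreachable and only makes the port total.
def fair_cut_brute_alt (arr : List Int) : Int :=
  let sums : List Int := arr.foldl (fun sums x => sums.map (· + x) ++ sums.map (· - x)) [0]
  match PySem.List.min? (sums.map (fun s => |s|)) (fun v => v) with
  | some m => m
  | none => 0

-- ===== PRECONDITION & SPEC =====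
-- Python's 'assert n <= 30' raises AssertionError on longer lists; Pre_ excludes exactly those.
def Pre_fair_cut_brute (arr : List Int) : Prop := arr.length ≤ 30
instance (arr : List Int) : Decidable (Pre_fair_cut_brute arr) := by unfold Pre_fair_cut_brute; infer_instance
def pvWitness_fair_cut_brute : List Int := [3, -1, 4]

-- On lists with negative total (and the empty list) A's initial bound sum(arr)+1 is never
-- beaten, so A returns it — negative when sum < -1, 0 when sum = -1, 1 on the empty list — while B returns
-- the true minimal absolute signed sum, the intended value of a fair-cut difference.
def D_fair_cut_brute (arr : List Int) : Prop := arr.sum < 0 ∨ arr = []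
instance (arr : List Int) : Decidable (D_fair_cut_brute arr) := by unfold D_fair_cut_brute; infer_instance

def Spec_fair_cut_brute (arr : List Int) (out : Int) : Prop := ¬ D_fair_cut_brute arr → out = fair_cut_brute_alt arr
instance (arr : List Int) (out : Int) : Decidable (Spec_fair_cut_brute arr out) := by unfold Spec_fair_cut_brute; infer_instance

def pvDiffWitness_fair_cut_brute : List Int := [-5]
def pvDiffWitnessOut_fair_cut_brute : Int × Int := (-4, 5)

-- ===== CLAIM (what is proved, stated in full; the proofs are below) =====
def Claim_unchanged_fair_cut_brute : Prop := ∀ (arr : List Int), Dom_fair_cut_brute arr → Pre_fair_cut_brute arr → Spec_fair_cut_brute arr (fair_cut_brute arr)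
def Claim_changed_fair_cut_brute : Prop := Dom_fair_cut_brute (pvDiffWitness_fair_cut_brute) ∧ Pre_fair_cut_brute (pvDiffWitness_fair_cut_brute) ∧ D_fair_cut_brute (pvDiffWitness_fair_cut_brute) ∧ fair_cut_brute (pvDiffWitness_fair_cut_brute) = pvDiffWitnessOut_fair_cut_brute.1 ∧ fair_cut_brute_alt (pvDiffWitness_fair_cut_brute) = pvDiffWitnessOut_fair_cut_brute.2 ∧ pvDiffWitnessOut_fair_cut_brute.1 ≠ pvDiffWitnessOut_fair_cut_brute.2
def Claim_exact_fair_cut_brute : Prop := ∀ (arr : List Int), Dom_fair_cut_brute arr → Pre_fair_cut_brute arr → D_fair_cut_brute arr → fair_cut_brute arr ≠ fair_cut_brute_alt arr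

-- ===== LEMMAS AND PROOFS =====

-- the signed sum selected by mask m: bit i of m picks +arr[i], else -arr[i] (head = bit 0)
def curAux : List Int → Nat → Int
  | [], _ => 0
  | x :: r, m => (if m % 2 = 1 then x else -x) + curAux r (m / 2)

lemma curAux_zero (arr : List Int) : curAux arr 0 = -arr.sum := by
  induction arr with
  | nil => simp [curAux]
  | cons x r ih => simp [curAux, ih]; ring

lemma curAux_allones (arr : List Int) : curAux arr (2 ^ arr.length - 1) = arr.sum := by
  induction arr with
  | nil => simp [curAux]
  | cons x r ih =>
      have hpos : 1 ≤ 2 ^ r.length := Nat.one_le_two_pow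
      have hp : 2 ^ (r.length + 1) = 2 * 2 ^ r.length := by rw [pow_succ]; ring
      have h1 : (2 ^ (r.length + 1) - 1) % 2 = 1 := by omega
      have h2 : (2 ^ (r.length + 1) - 1) / 2 = 2 ^ r.length - 1 := by omega
      simp [curAux, h1, h2, ih]

-- every signed sum has the parity of the total
lemma curAux_parity (arr : List Int) (m : Nat) : (2 : Int) ∣ (curAux arr m - arr.sum) := by
  induction arr generalizing m with
  | nil => simp [curAux]
  | cons x r ih =>
      have h := ih (m / 2)
      rcases h with ⟨c, hc⟩
      by_cases hb : m % 2 = 1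
      · exact ⟨c, by simp [curAux, hb]; linarith⟩
      · exact ⟨c - x, by simp [curAux, hb]; linarith⟩

-- membership in B's doubling fold = exactly the curAux values
lemma mem_doubling (arr : List Int) : ∀ (init : List Int) (s : Int),
    s ∈ arr.foldl (fun sums x => sums.map (· + x) ++ sums.map (· - x)) init ↔
      ∃ t ∈ init, ∃ m < 2 ^ arr.length, s = t + curAux arr m := by
  induction arr with
  | nil =>
      intro init s
      constructor
      · intro h; exact ⟨s, h, 0, by norm_num, by simp [curAux]⟩
      · rintro ⟨t, ht, m, _, rfl⟩; simpa [curAux] using ht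
  | cons x r ih =>
      intro init s
      rw [List.foldl_cons, ih]
      have hlen : (x :: r).length = r.length + 1 := rfl
      have hp : 2 ^ (r.length + 1) = 2 * 2 ^ r.length := by rw [pow_succ]; ring
      constructor
      · rintro ⟨t', ht', m, hm, rfl⟩
        rcases List.mem_append.1 ht' with h | h
        · rcases List.mem_map.1 h with ⟨t, ht, rfl⟩
          refine ⟨t, ht, 2 * m + 1, by rw [hlen]; omega, ?_⟩
          have h1 : (2 * m + 1) % 2 = 1 := by omega
          have h2 : (2 * m + 1) / 2 = m := by omega
          simp [curAux, h1, h2]; ring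
        · rcases List.mem_map.1 h with ⟨t, ht, rfl⟩
          refine ⟨t, ht, 2 * m, by rw [hlen]; omega, ?_⟩
          have h2 : (2 * m) / 2 = m := by omega
          simp [curAux, h2]; ring
      · rintro ⟨t, ht, m', hm', rfl⟩
        rw [hlen] at hm'
        by_cases hpar : m' % 2 = 1
        · refine ⟨t + x, List.mem_append.2 (.inl (List.mem_map.2 ⟨t, ht, rfl⟩)), m' / 2,
            by omega, ?_⟩
          simp [curAux, hpar]; ring
        · refine ⟨t - x, List.mem_append.2 (.inr (List.mem_map.2 ⟨t, ht, rfl⟩)), m' / 2,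
            by omega, ?_⟩
          simp [curAux, hpar]; ring

-- the bit test 'mask & (1 << i) != 0' as a parity test on the shifted mask
lemma band_shift_test (k s : Nat) :
    (PySem.Int.band (k : Int) ((1 : Int) <<< (s : Int)) ≠ 0) ↔ (k >>> s) % 2 = 1 := by
  have h1 : ((1 : Int) <<< (s : Int)) = (((1 <<< s : Nat) : Int)) := by
    rw [Int.one_shiftLeft, Nat.one_shiftLeft]
  rw [h1, PySem.Int.band_natCast]
  simp only [ne_eq, Nat.cast_eq_zero]
  have h2 : k &&& (1 <<< s) = (k.testBit s).toNat * 2 ^ s := by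
    rw [Nat.one_shiftLeft, Nat.and_two_pow]
  have h3 : k.testBit s = decide ((k >>> s) % 2 = 1) := (Nat.decide_shiftRight_mod_two_eq_one).symm
  rw [h2, h3]
  by_cases h : (k >>> s) % 2 = 1 <;> simp [h]

-- A's inner loop over enumerate, generalized start
lemma inner_enum (k : Nat) : ∀ (xs : List Int) (s : Nat) (acc : Int),
    (PySem.List.enumerate xs (s : Int)).foldl
      (fun cur p =>
        if PySem.Int.band (k : Int) ((1 : Int) <<< (p.1.toNat : Int)) ≠ 0 then cur + p.2 else cur - p.2)
      acc = acc + curAux xs (k >>> s) := by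
  intro xs
  induction xs with
  | nil => intro s acc; simp [PySem.List.enumerate_nil, curAux]
  | cons x r ih =>
      intro s acc
      rw [PySem.List.enumerate_cons, List.foldl_cons]
      have hcast : ((s : Int) + 1) = (((s + 1 : Nat) : Int)) := by push_cast; ring
      rw [hcast, ih (s + 1)]
      have hsh : k >>> (s + 1) = k >>> s / 2 := Nat.shiftRight_succ k s
      have hts : (((s : Int), x).1.toNat) = s := Int.toNat_natCast s
      by_cases hb : (k >>> s) % 2 = 1
      · have hc : PySem.Int.band (k : Int) ((1 : Int) <<< ((((s : Int), x).1.toNat : Nat) : Int)) ≠ 0 := by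
          rw [hts]; exact (band_shift_test k s).2 hb
        rw [if_pos hc]
        simp [curAux, hb, hsh]; ring
      · have hc : ¬ (PySem.Int.band (k : Int) ((1 : Int) <<< ((((s : Int), x).1.toNat : Nat) : Int)) ≠ 0) := by
          rw [hts]
          intro h; exact hb ((band_shift_test k s).1 h)
        rw [if_neg hc]
        simp [curAux, hb, hsh]; ring

-- A's inner loop computes curAux
lemma inner_eq (arr : List Int) (k : Nat) :
    (PySem.List.pyRange 0 (arr.length : Int) 1).foldl
      (fun cur i =>
        if PySem.Int.band (k : Int) ((1 : Int) <<< i.toNat) ≠ 0 then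
          cur + PySem.List.pyGetD arr i 0
        else
          cur - PySem.List.pyGetD arr i 0) 0 = curAux arr k := by
  have h0 := inner_enum k arr 0 0
  rw [Nat.cast_zero, PySem.List.enumerate_eq_map_pyRange arr 0, List.foldl_map] at h0
  simpa [PySem.List.len, Nat.shiftRight_zero] using h0

-- A as a running min over List.range (2^n - 1)
lemma A_char (arr : List Int) :
    fair_cut_brute arr =
      ((List.range (2 ^ arr.length - 1)).map (fun k => |curAux arr k|)).foldl min (arr.sum + 1) := by
  simp only [fair_cut_brute]
  have hcast : ((2 : Int) ^ arr.length - 1 - 0).toNat = 2 ^ arr.length - 1 := by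
    have h2 : ((2 : Int)) ^ arr.length = ((2 ^ arr.length : Nat) : Int) := by push_cast; ring
    have hpos : 1 ≤ 2 ^ arr.length := Nat.one_le_two_pow
    omega
  rw [PySem.List.pyRange_one 0 ((2 : Int) ^ arr.length - 1), hcast, List.foldl_map, List.foldl_map]
  apply PySem.List.foldl_congr_mem
  intro best j _
  simp only [zero_add]
  rw [inner_eq arr j]
  by_cases h : |curAux arr j| < best <;> simp [min_def, h]

-- every signed sum appears among B's sums, and conversely
lemma mem_sums_iff (arr : List Int) (s : Int) :
    s ∈ arr.foldl (fun sums x => sums.map (· + x) ++ sums.map (· - x)) [0] ↔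
      ∃ m < 2 ^ arr.length, s = curAux arr m := by
  rw [mem_doubling]
  constructor
  · rintro ⟨t, ht, m, hm, rfl⟩
    simp only [List.mem_singleton] at ht
    exact ⟨m, hm, by simp [ht]⟩
  · rintro ⟨m, hm, rfl⟩
    exact ⟨0, List.mem_singleton.2 rfl, m, hm, by ring⟩

-- B = min over all masks m < 2^n of |curAux arr m| (the none branch is unreachable)
lemma B_char (arr : List Int) :
    ∃ m < 2 ^ arr.length, fair_cut_brute_alt arr = |curAux arr m| ∧
      ∀ m' < 2 ^ arr.length, fair_cut_brute_alt arr ≤ |curAux arr m'| := by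
  simp only [fair_cut_brute_alt]
  set sums := arr.foldl (fun sums x => sums.map (· + x) ++ sums.map (· - x)) [0] with hsums
  set L2 := sums.map (fun s => |s|) with hL2
  have hmem0 : curAux arr 0 ∈ sums := (mem_sums_iff arr _).2 ⟨0, by positivity, rfl⟩
  rcases hmin : PySem.List.min? L2 (fun v => v) with _ | M
  · exfalso
    have h2 := (PySem.List.min?_eq_none_iff L2 (fun v => v)).1 hmin
    rw [hL2, List.map_eq_nil_iff] at h2
    rw [h2] at hmem0
    exact List.not_mem_nil hmem0
  have hMmem : M ∈ L2 := PySem.List.min?_mem hmin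
  rcases List.mem_map.1 hMmem with ⟨s, hs, rfl⟩
  rcases (mem_sums_iff arr s).1 hs with ⟨m, hm, rfl⟩
  refine ⟨m, hm, rfl, ?_⟩
  intro m' hm'
  have : curAux arr m' ∈ sums := (mem_sums_iff arr _).2 ⟨m', hm', rfl⟩
  exact PySem.List.min?_isMin hmin _ (List.mem_map.2 ⟨_, this, rfl⟩)

theorem fair_cut_brute_spec : Claim_unchanged_fair_cut_brute := by
  intro arr _ _
  unfold Spec_fair_cut_brute
  intro hnD
  unfold D_fair_cut_brute at hnD
  push Not at hnD
  obtain ⟨hsum, hne⟩ := hnD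
  have hn1 : 1 ≤ arr.length := by
    cases arr with
    | nil => exact absurd rfl hne
    | cons x r => simp
  have hpow1 : 1 ≤ 2 ^ arr.length - 1 := by
    have h2 : 2 ^ 1 ≤ 2 ^ arr.length := Nat.pow_le_pow_right (by norm_num) hn1
    omega
  obtain ⟨m, hm, hBeq, hBmin⟩ := B_char arr
  set B := fair_cut_brute_alt arr
  rw [A_char]
  set L1 := (List.range (2 ^ arr.length - 1)).map (fun k => |curAux arr k|) with hL1
  have hle2 : ∀ y ∈ L1, L1.foldl min (arr.sum + 1) ≤ y := (PySem.List.foldl_min_le L1 _).2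
  apply le_antisymm
  · -- A ≤ B = |curAux m|
    rw [hBeq]
    by_cases hm' : m < 2 ^ arr.length - 1
    · exact hle2 _ (List.mem_map.2 ⟨m, List.mem_range.2 hm', rfl⟩)
    · have hmeq : m = 2 ^ arr.length - 1 := by omega
      have h0 : |curAux arr 0| = |curAux arr m| := by
        rw [curAux_zero, hmeq, curAux_allones, abs_neg]
      calc L1.foldl min (arr.sum + 1) ≤ |curAux arr 0| :=
            hle2 _ (List.mem_map.2 ⟨0, List.mem_range.2 (by omega), rfl⟩)
        _ = |curAux arr m| := h0
  · -- B ≤ A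
    rcases PySem.List.foldl_min_mem L1 (arr.sum + 1) with h | h
    · rw [h]
      have hB0 : B ≤ |curAux arr 0| := hBmin 0 (by positivity)
      rw [curAux_zero, abs_neg, abs_of_nonneg hsum] at hB0
      omega
    · rcases List.mem_map.1 h with ⟨k, hk, hkeq⟩
      have hk' : k < 2 ^ arr.length := by
        have := List.mem_range.1 hk; omega
      exact hkeq ▸ hBmin k hk'

theorem fair_cut_brute_changed : Claim_changed_fair_cut_brute := by
  unfold Claim_changed_fair_cut_brute; decide

theorem fair_cut_brute_tight : Claim_exact_fair_cut_brute := by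
  intro arr _ _ hD
  unfold D_fair_cut_brute at hD
  rcases hD with hsum | hnil
  · -- sum < 0: A returns its unbeaten bound sum+1 ≤ 0; B is |curAux m| with the total's parity
    obtain ⟨m, hm, hBeq, _⟩ := B_char arr
    have hA : fair_cut_brute arr = arr.sum + 1 := by
      rw [A_char]
      generalize (List.range (2 ^ arr.length - 1)) = l
      induction l with
      | nil => simp
      | cons k t ih =>
          rw [List.map_cons, List.foldl_cons]
          have : min (arr.sum + 1) |curAux arr k| = arr.sum + 1 := by
            have := abs_nonneg (curAux arr k); omega
          rw [this, ih]
    rw [hA, hBeq]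
    have hBnn := abs_nonneg (curAux arr m)
    by_cases h1 : arr.sum + 1 = 0
    · -- sum = -1: the total is odd, so every |curAux| is odd and nonzero
      rcases curAux_parity arr m with ⟨c, hc⟩
      intro hcontra
      have h0 : |curAux arr m| = 0 := by linarith
      have habs : curAux arr m = 0 := abs_eq_zero.1 h0
      omega
    · omega
  · subst hnil; decide
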